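-- pv_equiv track=rewrite | github.com/shreyanks-1/Simple-Web-Scraper | Simhash Algo.py | calculateSimhash
-- ===== SOURCE A (Python) =====
-- P = 53
--
-- M = 2**64
--
-- def calculateHash(word):
--     hashValue = 0
--     pow = 1
--     for ch in word:
--         asciVal = ord(ch)
--         hashValue = hashValue + asciVal * pow
--         pow = pow * P
--     hashValue = hashValue % M
--     return hashValue
--
-- def calculateSimhash(wordFrequency):
--     vector = [0] * 64
--     for word in wordFrequency:
--         hashValue = calculateHash(word)
--         weight = wordFrequency[word]
--         for i in range(64):
--             bit = (hashValue >> i) & 1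
--             if bit == 1:
--                 vector[i] = vector[i] + weight
--             else:
--                 vector[i] = vector[i] - weight
--     finalSimhash = 0
--     for i in range(64):
--         if vector[i] > 0:
--             power = 2 ** i
--             finalSimhash = finalSimhash + power
--     return finalSimhash
-- ===== SOURCE B (Python) =====
-- P = 53
--
-- M = 2 ** 64
--
-- def calculateSimhash(wordFrequency):
--     hashes = []
--     for word, weight in wordFrequency.items():
--         h = 0
--         for ch in reversed(word):
--             h = (h * P + ord(ch)) % M
--         hashes.append((h, weight))
--     total = sum(w for _, w in hashes)
--     result = 0
--     for i in range(63, -1, -1):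
--         count = sum(w for h, w in hashes if (h >> i) & 1)
--         result = 2 * result + (1 if 2 * count > total else 0)
--     return result
-- ===== Notes on version B (the rewrite author's own statement) =====
-- stated objective: alternative
-- what changed: B computes each word's hash by a Horner scan of the reversed word (running % 2**64, no power variable) and replaces the signed 64-slot voting vector by per-bit weighted set-bit counts compared against the total weight (2*count > total), assembling the simhash high-bit-first via result = 2*result + bit.
import Mathlib
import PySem

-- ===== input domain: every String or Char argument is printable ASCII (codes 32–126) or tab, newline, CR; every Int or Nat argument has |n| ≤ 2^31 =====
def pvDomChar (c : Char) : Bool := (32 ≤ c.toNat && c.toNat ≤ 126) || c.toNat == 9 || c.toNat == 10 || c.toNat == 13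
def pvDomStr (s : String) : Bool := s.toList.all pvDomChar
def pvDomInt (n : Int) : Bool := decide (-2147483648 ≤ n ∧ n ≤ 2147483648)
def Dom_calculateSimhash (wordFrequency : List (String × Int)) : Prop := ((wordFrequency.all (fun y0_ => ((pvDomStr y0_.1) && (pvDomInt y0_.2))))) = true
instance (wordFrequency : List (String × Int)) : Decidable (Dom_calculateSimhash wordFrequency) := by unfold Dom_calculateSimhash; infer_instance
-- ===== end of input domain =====

-- B replaces the positional-power hash by a Horner scan of the reversed word and the
-- signed 64-slot vector by on-demand weighted set-bit counts compared against the total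
-- weight, assembling the result high-bit-first (objective: alternative decomposition).

-- ===== PORT A =====
-- ord(ch) * pow accumulation, then % 2**64 (PySem.Int.mod is Python's %)
def calculateHashA (word : String) : Int :=
  let st := word.toList.foldl
    (fun (st : Int × Int) ch => (st.1 + (ch.toNat : Int) * st.2, st.2 * 53)) (0, 1)
  PySem.Int.mod st.1 18446744073709551616

-- the inner 'for i in range(64)' voting loop of A, as a named helper
def voteLoopA (hashValue weight : Int) (a : Int) (v : List Int) : List Int :=
  (PySem.List.pyRange a 64 1).foldl
    (fun v i =>
      let bit := PySem.Int.band (hashValue >>> i) 1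
      if bit == 1 then
        PySem.List.pySetD v i (PySem.List.pyGetD v i 0 + weight)
      else
        PySem.List.pySetD v i (PySem.List.pyGetD v i 0 - weight)) v

-- wordFrequency is a Python dict: build it, iterate its keys, look each weight up
def calculateSimhash (wordFrequency : List (String × Int)) : Int :=
  let d := PySem.Dict.ofList wordFrequency
  let vector := d.keys.foldl
    (fun vector word => voteLoopA (calculateHashA word) (d.getD word 0) 0 vector)
    (List.replicate 64 (0 : Int))
  (PySem.List.pyRange 0 64 1).foldl
    (fun f i => if PySem.List.pyGetD vector i 0 > 0 then f + 2 ^ i.toNat else f) 0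

-- ===== PORT B =====
-- Horner over the reversed word with a running % 2**64
def hornerHash (word : String) : Int :=
  word.toList.reverse.foldl
    (fun h ch => PySem.Int.mod (h * 53 + (ch.toNat : Int)) 18446744073709551616) 0

def calculateSimhash_alt (wordFrequency : List (String × Int)) : Int :=
  let hashes := (PySem.Dict.ofList wordFrequency).items.map (fun p => (hornerHash p.1, p.2))
  let total := (hashes.map Prod.snd).sum
  (PySem.List.pyRange 63 (-1) (-1)).foldl
    (fun r i =>
      let count := ((hashes.filter
        (fun q => PySem.Int.band (q.1 >>> i) 1 == 1)).map Prod.snd).sum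
      2 * r + (if 2 * count > total then 1 else 0)) 0

-- ===== PRECONDITION & SPEC =====
def Spec_calculateSimhash (wordFrequency : List (String × Int)) (out : Int) : Prop := out = calculateSimhash_alt wordFrequency
instance (wordFrequency : List (String × Int)) (out : Int) : Decidable (Spec_calculateSimhash wordFrequency out) := by unfold Spec_calculateSimhash; infer_instance

-- ===== CLAIM (what is proved, stated in full; the proofs are below) =====
def Claim_equal_calculateSimhash : Prop := ∀ (wordFrequency : List (String × Int)), Dom_calculateSimhash wordFrequency → Spec_calculateSimhash wordFrequency (calculateSimhash wordFrequency)

-- ===== LEMMAS AND PROOFS =====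

-- bit i of a hash value, shared vocabulary of the proofs
def bitSet (h : Int) (i : Nat) : Bool := PySem.Int.band (h >>> (i : Int)) 1 == 1

-- the plain positional polynomial Σ ord(cᵢ)·53^i both hashes compute mod 2^64
def polyHash : List Char → Int
  | [] => 0
  | c :: cs => (c.toNat : Int) + 53 * polyHash cs

theorem foldA_fst (cs : List Char) (h p : Int) :
    (cs.foldl (fun (st : Int × Int) ch => (st.1 + (ch.toNat : Int) * st.2, st.2 * 53)) (h, p)).1
      = h + p * polyHash cs := by
  induction cs generalizing h p with
  | nil => simp [polyHash]
  | cons c cs ih => simp [List.foldl, polyHash, ih]; ring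

theorem hornerPlain (cs : List Char) :
    cs.reverse.foldl
      (fun h ch => PySem.Int.mod (h * 53 + (ch.toNat : Int)) 18446744073709551616) 0
      = PySem.Int.mod (polyHash cs) 18446744073709551616 := by
  induction cs with
  | nil => simp [polyHash]
  | cons c cs ih =>
      rw [List.reverse_cons, List.foldl_append, ih]
      simp only [List.foldl, polyHash]
      rw [PySem.Int.mod_eq_emod_of_pos (by norm_num),
          PySem.Int.mod_eq_emod_of_pos (by norm_num),
          PySem.Int.mod_eq_emod_of_pos (by norm_num)]
      conv_lhs => rw [Int.emod_def (polyHash cs)]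
      rw [show (polyHash cs - 18446744073709551616 * (polyHash cs / 18446744073709551616)) * 53 + (c.toNat : Int)
            = ((c.toNat : Int) + 53 * polyHash cs) + 18446744073709551616 * (-(53 * (polyHash cs / 18446744073709551616))) from by ring]
      rw [Int.add_mul_emod_self_left]

theorem hashA_eq_horner (w : String) : calculateHashA w = hornerHash w := by
  rw [calculateHashA, hornerHash, hornerPlain, foldA_fst]
  norm_num

theorem voteLoopA_spec (h w : Int) : ∀ (fuel : Nat) (a : Nat) (v : List Int),
    64 - a ≤ fuel → v.length = 64 →
    (voteLoopA h w (a:Int) v).length = 64 ∧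
    ∀ j, j < 64 → (voteLoopA h w (a:Int) v).getD j 0 =
      if j < a then v.getD j 0
      else v.getD j 0 + (if bitSet h j then w else -w) := by
  intro fuel
  induction fuel with
  | zero =>
      intro a v hf hv
      have ha : (64:Int) ≤ (a:Int) := by exact_mod_cast (by omega : (64:Nat) ≤ a)
      rw [voteLoopA, PySem.List.pyRange_one_eq_nil ha]
      simp only [List.foldl_nil]
      exact ⟨hv, fun j hj => by rw [if_pos (by omega : j < a)]⟩
  | succ fuel ih =>
      intro a v hf hv
      by_cases ha : a < 64
      · have ha' : ((a:Int)) < 64 := by exact_mod_cast ha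
        rw [voteLoopA, PySem.List.pyRange_one_cons ha']
        simp only [List.foldl_cons]
        have key : ∀ x : Int, x = v.getD a 0 + (if bitSet h a then w else -w) →
            ((PySem.List.pyRange ((a:Int)+1) 64 1).foldl
              (fun v i =>
                let bit := PySem.Int.band (h >>> i) 1
                if bit == 1 then
                  PySem.List.pySetD v i (PySem.List.pyGetD v i 0 + w)
                else
                  PySem.List.pySetD v i (PySem.List.pyGetD v i 0 - w)) (v.set a x)).length = 64 ∧
            ∀ j, j < 64 → ((PySem.List.pyRange ((a:Int)+1) 64 1).foldl
              (fun v i =>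
                let bit := PySem.Int.band (h >>> i) 1
                if bit == 1 then
                  PySem.List.pySetD v i (PySem.List.pyGetD v i 0 + w)
                else
                  PySem.List.pySetD v i (PySem.List.pyGetD v i 0 - w)) (v.set a x)).getD j 0 =
              if j < a then v.getD j 0
              else v.getD j 0 + (if bitSet h j then w else -w) := by
          intro x hxv
          have hrec := ih (a+1) (v.set a x) (by omega) (by simp [hv])
          rw [voteLoopA] at hrec
          rw [show ((a:Int) + 1) = ((a+1:Nat):Int) from by push_cast; ring]
          have hgetself : (v.set a x).getD a 0 = x := by
            simp [List.getD_eq_getElem?_getD, hv, ha]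
          have hgetne : ∀ j', ¬ j' = a → (v.set a x).getD j' 0 = v.getD j' 0 := by
            intro j' hj'
            simp only [List.getD_eq_getElem?_getD, List.getElem?_set]
            rw [if_neg (Ne.symm hj')]
          refine ⟨hrec.1, ?_⟩
          intro j hj
          rw [hrec.2 j hj]
          by_cases hje : j = a
          · subst hje
            rw [if_pos (by omega : j < j + 1), hgetself, if_neg (lt_irrefl j)]
            exact hxv
          · rw [hgetne j hje]
            by_cases hja : j < a
            · rw [if_pos (by omega : j < a + 1), if_pos hja]
            · rw [if_neg (by omega : ¬ j < a + 1), if_neg hja]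
        by_cases hb : PySem.Int.band (h >>> ((a:Nat):Int)) 1 == 1
        · have hbit : bitSet h a := by simpa [bitSet] using hb
          rw [if_pos hb]
          have hx : PySem.List.pySetD v (a:Int) (PySem.List.pyGetD v (a:Int) 0 + w)
              = v.set a (v.getD a 0 + (if bitSet h a then w else -w)) := by
            simp [hbit, PySem.List.pySetD_natCast, PySem.List.pyGetD_natCast]
          rw [hx]
          exact key _ rfl
        · have hbit : ¬ bitSet h a := by simpa [bitSet] using hb
          rw [if_neg hb]
          have hx : PySem.List.pySetD v (a:Int) (PySem.List.pyGetD v (a:Int) 0 - w)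
              = v.set a (v.getD a 0 + (if bitSet h a then w else -w)) := by
            simp [hbit, PySem.List.pySetD_natCast, PySem.List.pyGetD_natCast, sub_eq_add_neg]
          rw [hx]
          exact key _ rfl
      · have ha' : (64:Int) ≤ (a:Int) := by exact_mod_cast (by omega : (64:Nat) ≤ a)
        rw [voteLoopA, PySem.List.pyRange_one_eq_nil ha']
        simp only [List.foldl_nil]
        exact ⟨hv, fun j hj => by rw [if_pos (by omega : j < a)]⟩

-- the signed vote A accumulates at bit j over the key list
def voteSum (d : PySem.Dict String Int) (ks : List String) (j : Nat) : Int :=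
  (ks.map (fun k => if bitSet (hornerHash k) j then d.getD k 0 else -(d.getD k 0))).sum

theorem outerA_spec (d : PySem.Dict String Int) : ∀ (ks : List String) (v : List Int),
    v.length = 64 →
    (ks.foldl (fun vector word => voteLoopA (calculateHashA word) (d.getD word 0) 0 vector) v).length = 64 ∧
    ∀ j, j < 64 →
      (ks.foldl (fun vector word => voteLoopA (calculateHashA word) (d.getD word 0) 0 vector) v).getD j 0
        = v.getD j 0 + voteSum d ks j := by
  intro ks
  induction ks with
  | nil => intro v hv; exact ⟨hv, fun j _ => by simp [voteSum]⟩
  | cons k ks ih =>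
      intro v hv
      simp only [List.foldl_cons]
      have h0 : ((0:Nat):Int) = (0:Int) := by norm_num
      have hstep := voteLoopA_spec (calculateHashA k) (d.getD k 0) 64 0 v (by omega) hv
      rw [h0] at hstep
      have hrec := ih (voteLoopA (calculateHashA k) (d.getD k 0) 0 v) hstep.1
      refine ⟨hrec.1, ?_⟩
      intro j hj
      rw [hrec.2 j hj, hstep.2 j hj, if_neg (by omega : ¬ j < 0)]
      rw [show voteSum d (k :: ks) j
            = (if bitSet (hornerHash k) j then d.getD k 0 else -(d.getD k 0)) + voteSum d ks j
          from by rw [voteSum, voteSum, List.map_cons, List.sum_cons]]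
      rw [hashA_eq_horner]
      ring

-- A's final loop is the ascending weighted sum of positive-vote bits
theorem finalA_sum (v : List Int) : ∀ (n : Nat) (acc : Int),
    (PySem.List.pyRange 0 (n:Int) 1).foldl
      (fun f i => if PySem.List.pyGetD v i 0 > 0 then f + 2 ^ i.toNat else f) acc
    = acc + ∑ i ∈ Finset.range n, (if v.getD i 0 > 0 then 2 ^ i else (0:Int)) := by
  intro n
  induction n with
  | zero => intro acc; simp
  | succ n ih =>
      intro acc
      rw [show (((n+1:Nat)):Int) = ((n:Int) + 1) from by push_cast; ring]
      rw [PySem.List.pyRange_one_succ_right (by omega), List.foldl_append]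
      simp only [List.foldl_cons, List.foldl_nil]
      rw [ih, Finset.sum_range_succ]
      by_cases hp : PySem.List.pyGetD v ((n:Nat):Int) 0 > 0
      · rw [if_pos hp]
        have : v.getD n 0 > 0 := by simpa [PySem.List.pyGetD_natCast] using hp
        rw [if_pos this]
        simp [Int.toNat_natCast]
        ring
      · rw [if_neg hp]
        have : ¬ v.getD n 0 > 0 := by simpa [PySem.List.pyGetD_natCast] using hp
        rw [if_neg this]
        ring

-- B's final loop is the descending Horner assembly of the same bits
theorem finalB_sum (hashes : List (Int × Int)) (total : Int) : ∀ (m : Nat) (acc : Int),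
    (PySem.List.pyRange (m:Int) (-1) (-1)).foldl
      (fun r i =>
        let count := ((hashes.filter
          (fun q => PySem.Int.band (q.1 >>> i) 1 == 1)).map Prod.snd).sum
        2 * r + (if 2 * count > total then 1 else 0)) acc
    = acc * 2 ^ (m+1) + ∑ i ∈ Finset.range (m+1),
        (if 2 * ((hashes.filter
          (fun q => PySem.Int.band (q.1 >>> ((i:Nat):Int)) 1 == 1)).map Prod.snd).sum > total
         then 1 else (0:Int)) * 2 ^ i := by
  intro m
  induction m with
  | zero =>
      intro acc
      rw [show (((0:Nat)):Int) = (0:Int) from by norm_num]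
      rw [PySem.List.pyRange_neg_one_cons (by norm_num), PySem.List.pyRange_neg_one_eq_nil (by norm_num)]
      simp only [List.foldl_cons, List.foldl_nil]
      rw [Finset.sum_range_one]
      push_cast
      ring
  | succ m ih =>
      intro acc
      rw [show (((m+1:Nat)):Int) = ((m:Int) + 1) from by push_cast; ring]
      rw [PySem.List.pyRange_neg_one_cons (by omega)]
      simp only [List.foldl_cons]
      rw [show ((m:Int) + 1 - 1) = ((m:Nat):Int) from by omega, ih]
      conv_rhs => rw [Finset.sum_range_succ]
      rw [show (((m+1:Nat)):Int) = ((m:Int) + 1) from by push_cast; ring]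
      ring

-- filtered weighted sum = per-element conditional sum
theorem filter_sum_eq (items : List (String × Int)) (j : Nat) :
    (((items.map (fun p => (hornerHash p.1, p.2))).filter
        (fun q => PySem.Int.band (q.1 >>> ((j:Nat):Int)) 1 == 1)).map Prod.snd).sum
    = (items.map (fun p => if bitSet (hornerHash p.1) j then p.2 else 0)).sum := by
  induction items with
  | nil => simp
  | cons p items ih =>
      simp only [List.map_cons, List.filter_cons]
      by_cases hb : bitSet (hornerHash p.1) j
      · rw [if_pos (by simpa [bitSet] using hb)]
        simp only [List.map_cons, List.sum_cons, ih, if_pos hb]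
      · rw [if_neg (by simpa [bitSet] using hb)]
        simp only [List.sum_cons, ih, if_neg hb]
        ring

-- signed vote = twice the set-bit count minus the total weight
theorem vote_count_total (l : List String) (g : String → Int) (b : String → Bool) :
    (l.map (fun k => if b k then g k else -(g k))).sum
    = 2 * (l.map (fun k => if b k then g k else 0)).sum - (l.map g).sum := by
  induction l with
  | nil => simp
  | cons k l ih =>
      simp only [List.map_cons, List.sum_cons, ih]
      by_cases hb : b k <;> simp [hb] <;> ring

theorem calculateSimhash_spec' (wf : List (String × Int)) :
    calculateSimhash wf = calculateSimhash_alt wf := by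
  rw [calculateSimhash, calculateSimhash_alt]
  set d := PySem.Dict.ofList wf with hd
  have hnd : d.keys.Nodup := PySem.Dict.nodup_keys_ofList wf
  have houter := outerA_spec d d.keys (List.replicate 64 0) (by simp)
  set vector := d.keys.foldl
      (fun vector word => voteLoopA (calculateHashA word) (d.getD word 0) 0 vector)
      (List.replicate 64 (0:Int)) with hvec
  have hitems : d.items = d.keys.map (fun k => (k, d.getD k 0)) :=
    PySem.Dict.items_eq_map_keys d hnd 0
  -- A side
  rw [show (64:Int) = ((64:Nat):Int) from by norm_num, finalA_sum]
  -- B side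
  rw [show (63:Int) = ((63:Nat):Int) from by norm_num, finalB_sum]
  simp only [zero_add, zero_mul]
  -- identify the two sums termwise
  apply Finset.sum_congr rfl
  intro j hj
  have hj64 : j < 64 := Finset.mem_range.mp hj
  rw [houter.2 j hj64]
  have hrepl : (List.replicate 64 (0:Int)).getD j 0 = 0 := by
    rw [List.getD_eq_getElem?_getD, List.getElem?_replicate, if_pos hj64]
    rfl
  rw [hrepl, zero_add]
  -- rewrite B's count and total over the key list
  rw [filter_sum_eq d.items j]
  have htotal : ((d.items.map (fun p => (hornerHash p.1, p.2))).map Prod.snd).sum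
      = (d.keys.map (fun k => d.getD k 0)).sum := by
    rw [hitems]
    rw [List.map_map, List.map_map]
    rfl
  have hcount : (d.items.map (fun p => if bitSet (hornerHash p.1) j then p.2 else 0)).sum
      = (d.keys.map (fun k => if bitSet (hornerHash k) j then d.getD k 0 else 0)).sum := by
    rw [hitems]
    rw [List.map_map]
    rfl
  rw [htotal, hcount]
  have hvote : voteSum d d.keys j
      = 2 * (d.keys.map (fun k => if bitSet (hornerHash k) j then d.getD k 0 else 0)).sum
        - (d.keys.map (fun k => d.getD k 0)).sum := by
    rw [voteSum]
    exact vote_count_total d.keys (fun k => d.getD k 0) (fun k => bitSet (hornerHash k) j)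
  rw [hvote]
  set C := (d.keys.map (fun k => if bitSet (hornerHash k) j then d.getD k 0 else 0)).sum
  set T := (d.keys.map (fun k => d.getD k 0)).sum
  by_cases hc : 2 * C > T
  · rw [if_pos (by omega : 2 * C - T > 0), if_pos hc]
    ring
  · rw [if_neg (by omega : ¬ 2 * C - T > 0), if_neg hc]
    ring

-- ===== VERDICT (by name: the statement is the Claim_ definition above) =====
theorem calculateSimhash_spec : Claim_equal_calculateSimhash := by
  intro wf _
  unfold Spec_calculateSimhash
  exact calculateSimhash_spec' wf
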